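-- pv_equiv track=rewrite | github.com/hrnycze/warehouseSim | Pathfinding-Python/astar.py | find_all_best_pos_in_stack
-- ===== SOURCE A (Python) =====
-- from queue import PriorityQueue
--
-- def find_all_best_pos_in_stack(num, warehouse):
-- 	"""return sorted list of position of id 'num' """
-- 	all_best_pos = PriorityQueue()
-- 	for i,stack in enumerate(warehouse):
-- 		for j,val in enumerate(stack):
-- 			if val == num:
-- 				all_best_pos.put(j)
-- 	pos = []
-- 	while not all_best_pos.empty():
-- 		pos.append(all_best_pos.get())
--
-- 	return pos
-- ===== SOURCE B (Python) =====
-- def find_all_best_pos_in_stack(num, warehouse):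
--     """return sorted list of position of id 'num' """
--     width = max(map(len, warehouse), default=0)
--     pos = []
--     for k in range(width):
--         c = sum(1 for s in warehouse if k < len(s) and s[k] == num)
--         pos += [k] * c
--     return pos
-- ===== Notes on version B (the rewrite author's own statement) =====
-- stated objective: alternative
-- what changed: Replaces the PriorityQueue (comparison-based heap sort of collected indices) with a counting pass: for each column index in ascending order it counts matching cells across all rows and emits the index that many times, so no sorting structure is used at all.
import Mathlib
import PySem

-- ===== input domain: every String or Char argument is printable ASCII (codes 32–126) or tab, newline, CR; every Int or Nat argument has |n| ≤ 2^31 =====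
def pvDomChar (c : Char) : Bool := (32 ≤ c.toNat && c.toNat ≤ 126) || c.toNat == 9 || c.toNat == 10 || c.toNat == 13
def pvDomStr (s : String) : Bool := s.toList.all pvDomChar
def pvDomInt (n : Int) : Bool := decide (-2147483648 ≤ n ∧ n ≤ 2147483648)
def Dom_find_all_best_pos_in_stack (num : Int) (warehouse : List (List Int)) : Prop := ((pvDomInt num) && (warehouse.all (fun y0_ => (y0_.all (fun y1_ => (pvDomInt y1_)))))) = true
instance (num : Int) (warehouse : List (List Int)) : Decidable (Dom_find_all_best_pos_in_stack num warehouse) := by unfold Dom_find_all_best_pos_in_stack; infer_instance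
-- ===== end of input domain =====

-- B replaces A's PriorityQueue of hit indices by a column-wise counting pass (no sorting); same return value, equivalence of return values proved below.

-- ===== PORT A =====
-- The int PriorityQueue is modeled exactly: put = ordered insert keeping the queue
-- ascending (ints are totally ordered, so this is the heap's extraction order),
-- get = pop the front; the while-loop drains the queue front to back.
def pvPutAll (num : Int) (stack : List Int) (j : Nat) (q : List Int) : List Int :=
  match stack with
  | [] => q
  | v :: t => pvPutAll num t (j + 1)
      (if v == num then PySem.List.insertBy (fun a b => decide (a < b)) ((j : Nat) : Int) q else q)

def pvDrain : List Int → List Int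
  | [] => []
  | x :: xs => x :: pvDrain xs

def find_all_best_pos_in_stack (num : Int) (warehouse : List (List Int)) : List Int :=
  let q := warehouse.foldl (fun q stack => pvPutAll num stack 0 q) []
  pvDrain q

-- ===== PORT B =====
-- range(width) over the nonnegative width is ported as List.range; `k < len(s) and s[k] == num`
-- is ported as a match on s[k]? (exact: k ≥ 0 here).
def find_all_best_pos_in_stack_alt (num : Int) (warehouse : List (List Int)) : List Int :=
  let width := warehouse.foldl (fun m s => max m s.length) 0
  (List.range width).foldl (fun pos k =>
    pos ++ List.replicate
      (warehouse.foldl (fun c s =>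
        match s[k]? with
        | some v => if v == num then c + 1 else c
        | none => c) 0)
      ((k : Nat) : Int)) []

-- ===== PRECONDITION & SPEC =====
def Spec_find_all_best_pos_in_stack (num : Int) (warehouse : List (List Int)) (out : List Int) : Prop := out = find_all_best_pos_in_stack_alt num warehouse
instance (num : Int) (warehouse : List (List Int)) (out : List Int) : Decidable (Spec_find_all_best_pos_in_stack num warehouse out) := by unfold Spec_find_all_best_pos_in_stack; infer_instance

-- ===== CLAIM (what is proved, stated in full; the proofs are below) =====
def Claim_equal_find_all_best_pos_in_stack : Prop := ∀ (num : Int) (warehouse : List (List Int)), Dom_find_all_best_pos_in_stack num warehouse → Spec_find_all_best_pos_in_stack num warehouse (find_all_best_pos_in_stack num warehouse)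

-- ===== LEMMAS AND PROOFS =====

-- whether row s has a hit at column k
def pvHit (num : Int) (s : List Int) (k : Nat) : Bool :=
  match s[k]? with
  | some v => v == num
  | none => false

-- the column indices (offset by j) of the hits in row s, in order
def pvColHits (num : Int) (s : List Int) (j : Nat) : List Int :=
  match s with
  | [] => []
  | v :: t => (if v == num then [((j : Nat) : Int)] else []) ++ pvColHits num t (j + 1)

theorem pvDrain_id (l : List Int) : pvDrain l = l := by
  induction l with
  | nil => rfl
  | cons x xs ih => simp [pvDrain, ih]

theorem pvPutAll_eq (num : Int) (s : List Int) : ∀ (j : Nat) (q : List Int),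
    pvPutAll num s j q =
      (pvColHits num s j).foldl
        (fun acc x => PySem.List.insertBy (fun a b => decide (a < b)) x acc) q := by
  induction s with
  | nil => intro j q; rfl
  | cons v t ih =>
    intro j q
    by_cases h : (v == num) = true <;>
      simp [pvPutAll, pvColHits, h, ih]

theorem pvOuter_eq (num : Int) (w : List (List Int)) : ∀ (q : List Int),
    w.foldl (fun q s => pvPutAll num s 0 q) q =
      (w.flatMap fun s => pvColHits num s 0).foldl
        (fun acc x => PySem.List.insertBy (fun a b => decide (a < b)) x acc) q := by
  induction w with
  | nil => intro q; rfl
  | cons s t ih =>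
    intro q
    rw [List.foldl_cons, ih, pvPutAll_eq, ← List.foldl_append]
    simp [List.flatMap_cons]

theorem pvA_eq_sorted (num : Int) (w : List (List Int)) :
    find_all_best_pos_in_stack num w =
      PySem.List.sorted (w.flatMap fun s => pvColHits num s 0) (fun x => x) := by
  unfold find_all_best_pos_in_stack
  rw [pvDrain_id, pvOuter_eq, PySem.List.sorted_eq_foldl_insertBy]

theorem pvCnt_eq (num : Int) (k : Nat) (w : List (List Int)) : ∀ (c : Nat),
    w.foldl (fun c s =>
        match s[k]? with
        | some v => if v == num then c + 1 else c
        | none => c) c =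
      c + (w.map fun s => if pvHit num s k then 1 else 0).sum := by
  induction w with
  | nil => intro c; simp
  | cons s t ih =>
    intro c
    have hhead : (match s[k]? with
        | some v => if v == num then c + 1 else c
        | none => c) = (if pvHit num s k then c + 1 else c) := by
      unfold pvHit
      cases s[k]? with
      | none => simp
      | some v => by_cases hv : (v == num) = true <;> simp [hv]
    rw [List.foldl_cons, hhead, ih]
    simp only [List.map_cons, List.sum_cons]
    by_cases hv : pvHit num s k = true <;> simp [hv] <;> try omega

theorem pvB_eq_flatMap (num : Int) (w : List (List Int)) :
    find_all_best_pos_in_stack_alt num w =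
      (List.range (w.foldl (fun m s => max m s.length) 0)).flatMap
        (fun k => List.replicate ((w.map fun s => if pvHit num s k then 1 else 0).sum) ((k : Nat) : Int)) := by
  unfold find_all_best_pos_in_stack_alt
  simp only [PySem.List.foldl_append_eq_flatMap, List.nil_append, pvCnt_eq, Nat.zero_add]

theorem pvPairwise (c : Nat → Nat) : ∀ (l : List Nat), l.Pairwise (· < ·) →
    (l.flatMap fun k => List.replicate (c k) ((k : Nat) : Int)).Pairwise (· ≤ ·) := by
  intro l
  induction l with
  | nil => intro _; simp
  | cons k t ih =>
    intro hp
    rw [List.pairwise_cons] at hp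
    rw [List.flatMap_cons, List.pairwise_append]
    refine ⟨List.pairwise_replicate.mpr (Or.inr le_rfl), ih hp.2, ?_⟩
    intro x hx y hy
    obtain ⟨k', hk', hy'⟩ := List.mem_flatMap.mp hy
    rw [List.eq_of_mem_replicate hx, List.eq_of_mem_replicate hy']
    exact_mod_cast le_of_lt (hp.1 k' hk')

theorem pvSumComm {α β M : Type} [AddCommMonoid M] (f : α → β → M) :
    ∀ (l1 : List α) (l2 : List β),
      (l1.map fun a => (l2.map (f a)).sum).sum = (l2.map fun b => (l1.map fun a => f a b).sum).sum := by
  intro l1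
  induction l1 with
  | nil => intro l2; simp
  | cons a t ih =>
    intro l2
    simp only [List.map_cons, List.sum_cons, ih]
    rw [← List.sum_map_add]
  
theorem pvRowMultiset (num : Int) : ∀ (s : List Int) (j m : Nat), s.length ≤ m →
    ((pvColHits num s j : List Int) : Multiset Int) =
      ((List.range m).map fun k =>
        if pvHit num s k then ({((j + k : Nat) : Int)} : Multiset Int) else 0).sum := by
  intro s
  induction s with
  | nil =>
    intro j m _
    simp [pvColHits, pvHit]
  | cons v t ih =>
    intro j m hm
    cases m with
    | zero => simp at hm
    | succ m' =>
      rw [List.range_succ_eq_map]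
      simp only [List.map_cons, List.sum_cons, List.map_map]
      have h0 : pvHit num (v :: t) 0 = (v == num) := rfl
      have hfun : ((fun k => if pvHit num (v :: t) k then ({((j + k : Nat) : Int)} : Multiset Int) else 0) ∘ Nat.succ)
          = fun k => if pvHit num t k then ({(((j + 1) + k : Nat) : Int)} : Multiset Int) else 0 := by
        funext k
        have hsucc : pvHit num (v :: t) (k + 1) = pvHit num t k := rfl
        have harith : j + (k + 1) = (j + 1) + k := by omega
        simp [Function.comp, hsucc, harith]
      rw [hfun, ← ih (j + 1) m' (by simpa using hm)]
      simp only [pvColHits, h0]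
      by_cases hv : (v == num) = true <;> simp [hv]

theorem pvReplicateMultiset (num : Int) (k : Nat) : ∀ (w : List (List Int)),
    Multiset.replicate ((w.map fun s => if pvHit num s k then 1 else 0).sum) ((k : Nat) : Int) =
      (w.map fun s => if pvHit num s k then ({((k : Nat) : Int)} : Multiset Int) else 0).sum := by
  intro w
  induction w with
  | nil => simp
  | cons s t ih =>
    simp only [List.map_cons, List.sum_cons, Multiset.replicate_add, ih]
    by_cases hv : pvHit num s k = true <;> simp [hv]

theorem pvCoeFlatMap {α β : Type} (f : α → List β) : ∀ (l : List α),
    ((l.flatMap f : List β) : Multiset β) = (l.map fun x => ((f x : List β) : Multiset β)).sum := by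
  intro l
  induction l with
  | nil => simp
  | cons a t ih => rw [List.flatMap_cons, ← Multiset.coe_add, ih]; simp

theorem pvWidth_ge_init : ∀ (w : List (List Int)) (a : Nat),
    a ≤ w.foldl (fun m s => max m s.length) a := by
  intro w
  induction w with
  | nil => intro a; simp
  | cons s t ih =>
    intro a
    exact le_trans (le_max_left a s.length) (ih (max a s.length))

theorem pvWidth_le (w : List (List Int)) : ∀ (a : Nat) (s : List Int), s ∈ w →
    s.length ≤ w.foldl (fun m s => max m s.length) a := by
  induction w with
  | nil => intro a s hs; simp at hs
  | cons r t ih =>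
    intro a s hs
    rcases List.mem_cons.mp hs with h | h
    · subst h
      exact le_trans (le_max_right a s.length)
        (pvWidth_ge_init t (max a s.length))
    · exact ih (max a r.length) s h

theorem pvPerm (num : Int) (w : List (List Int)) :
    ((List.range (w.foldl (fun m s => max m s.length) 0)).flatMap
        (fun k => List.replicate ((w.map fun s => if pvHit num s k then 1 else 0).sum) ((k : Nat) : Int))).Perm
      (w.flatMap fun s => pvColHits num s 0) := by
  rw [← Multiset.coe_eq_coe]
  rw [pvCoeFlatMap, pvCoeFlatMap]
  have hR : ∀ s ∈ w, ((pvColHits num s 0 : List Int) : Multiset Int)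
      = ((List.range (w.foldl (fun m s => max m s.length) 0)).map fun k =>
          if pvHit num s k then ({((k : Nat) : Int)} : Multiset Int) else 0).sum := by
    intro s hs
    have := pvRowMultiset num s 0 (w.foldl (fun m s => max m s.length) 0) (pvWidth_le w 0 s hs)
    simpa using this
  rw [List.map_congr_left hR]
  rw [pvSumComm]
  refine congrArg List.sum (List.map_congr_left ?_)
  intro k _
  rw [Multiset.coe_replicate, pvReplicateMultiset]

-- ===== VERDICT (by name: the statement is the Claim_ definition above) =====
theorem find_all_best_pos_in_stack_spec : Claim_equal_find_all_best_pos_in_stack := by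
  intro num w _
  show find_all_best_pos_in_stack num w = find_all_best_pos_in_stack_alt num w
  rw [pvA_eq_sorted, pvB_eq_flatMap]
  exact PySem.List.sorted_id_eq_of_perm_of_pairwise _ _ (pvPerm num w)
    (pvPairwise _ (List.range _) (List.pairwise_lt_range))
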